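-- pv_equiv track=rewrite | github.com/danielplohmann/mcrit | plugins/ida/widgets/FunctionOverviewWidget.py | _calculateLabelCriticality
-- ===== SOURCE A (Python) =====
-- def _calculateLabelCriticality(label_list):
--     criticality = 0
--     if len(label_list) == 0:
--         return criticality
--     label_set = set([label_entry[1] for label_entry in label_list])
--     top_score = max([label_entry[0] for label_entry in label_list])
--     top_score_label_pool = [label_entry for label_entry in label_list if label_entry[0] == top_score]
--     if len(label_set) > 1:
--         criticality += 1
--         if len(set([label_entry[1] for label_entry in top_score_label_pool])) > 1:
--             criticality += 1
--     return criticality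
-- ===== SOURCE B (Python) =====
-- def _calculateLabelCriticality(label_list):
--     if not label_list:
--         return 0
--     all_labels = set()
--     cur_max = None
--     top_labels = set()
--     for score, label in label_list:
--         if cur_max is None or score > cur_max:
--             cur_max = score
--             top_labels = {label}
--         elif score == cur_max:
--             top_labels.add(label)
--         all_labels.add(label)
--     crit = 0
--     if len(all_labels) > 1:
--         crit += 1
--         if len(top_labels) > 1:
--             crit += 1
--     return crit
-- ===== Notes on version B (the rewrite author's own statement) =====
-- stated objective: simpler
-- what changed: Replaces A's four separate passes (label set comprehension, max pass, filter pass, pool set comprehension) by a single loop that maintains the label set, the running maximum and the top-score label pool online, resetting the pool whenever a new maximum is found.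
import Mathlib
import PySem

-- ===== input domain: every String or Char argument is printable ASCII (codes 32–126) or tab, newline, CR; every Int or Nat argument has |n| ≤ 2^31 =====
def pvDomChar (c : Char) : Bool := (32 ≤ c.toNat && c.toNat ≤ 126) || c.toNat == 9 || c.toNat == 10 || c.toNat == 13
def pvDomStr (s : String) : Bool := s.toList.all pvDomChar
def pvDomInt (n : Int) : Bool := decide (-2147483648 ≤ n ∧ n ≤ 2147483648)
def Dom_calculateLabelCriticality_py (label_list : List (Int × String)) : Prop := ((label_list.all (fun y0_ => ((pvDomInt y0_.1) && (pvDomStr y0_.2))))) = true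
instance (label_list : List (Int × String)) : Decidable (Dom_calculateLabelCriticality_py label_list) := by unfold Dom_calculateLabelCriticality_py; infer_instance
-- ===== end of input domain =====

-- B replaces A's four separate passes (set of labels, max, filter, set of pool labels)
-- by ONE loop that maintains the label set, the running maximum and the top-label pool
-- online, resetting the pool whenever a new maximum appears (objective: simpler).

-- ===== PORT A =====
def calculateLabelCriticality_py (label_list : List (Int × String)) : Int :=
  let criticality : Int := 0
  if label_list.length = 0 then criticality
  else
    let label_set : PySem.Set String := PySem.Set.ofList (label_list.map (fun e => e.2))
    -- max() on a nonempty list: PySem.List.max? is some here; getD is only reached nonempty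
    let top_score : Int := (PySem.List.max? (label_list.map (fun e => e.1)) (fun y => y)).getD 0
    let top_score_label_pool : List (Int × String) := label_list.filter (fun e => e.1 == top_score)
    if PySem.Set.len label_set > 1 then
      let criticality := criticality + 1
      if PySem.Set.len (PySem.Set.ofList (top_score_label_pool.map (fun e => e.2))) > 1 then
        criticality + 1
      else criticality
    else criticality

-- ===== PORT B =====
-- the single for-loop of Source B: state = (all_labels, cur_max, top_labels)
def pvAltLoop : List (Int × String) → PySem.Set String → Option Int → PySem.Set String →
    PySem.Set String × Option Int × PySem.Set String
  | [], all, cm, top => (all, cm, top)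
  | (score, label) :: rest, all, cm, top =>
    let st : Option Int × PySem.Set String :=
      match cm with
      | none => (some score, PySem.Set.ofList [label])
      | some m =>
        if score > m then (some score, PySem.Set.ofList [label])
        else if score == m then (some m, PySem.Set.add top label)
        else (some m, top)
    pvAltLoop rest (PySem.Set.add all label) st.1 st.2

def calculateLabelCriticality_py_alt (label_list : List (Int × String)) : Int :=
  if label_list = [] then 0
  else
    let res := pvAltLoop label_list PySem.Set.empty none PySem.Set.empty
    let crit : Int := 0
    if PySem.Set.len res.1 > 1 then
      let crit := crit + 1
      if PySem.Set.len res.2.2 > 1 then crit + 1 else crit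
    else crit

-- ===== PRECONDITION & SPEC =====
def Spec_calculateLabelCriticality_py (label_list : List (Int × String)) (out : Int) : Prop := out = calculateLabelCriticality_py_alt label_list
instance (label_list : List (Int × String)) (out : Int) : Decidable (Spec_calculateLabelCriticality_py label_list out) := by unfold Spec_calculateLabelCriticality_py; infer_instance

-- ===== CLAIM (what is proved, stated in full; the proofs are below) =====
def Claim_equal_calculateLabelCriticality_py : Prop := ∀ (label_list : List (Int × String)), Dom_calculateLabelCriticality_py label_list → Spec_calculateLabelCriticality_py label_list (calculateLabelCriticality_py label_list)

-- ===== LEMMAS AND PROOFS =====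

-- the three quantities A computes, as functions of a processed (nonempty) prefix
def pvMaxOf (x : Int × String) (t : List (Int × String)) : Int :=
  (t.map (fun e => e.1)).foldl max x.1

def pvAllOf (p : List (Int × String)) : PySem.Set String :=
  PySem.Set.ofList (p.map (fun e => e.2))

def pvTopOf (x : Int × String) (t : List (Int × String)) : PySem.Set String :=
  PySem.Set.ofList (((x :: t).filter (fun e => e.1 == pvMaxOf x t)).map (fun e => e.2))

theorem pvOfList_append_one {α : Type} [BEq α] (l : List α) (x : α) :
    PySem.Set.ofList (l ++ [x]) = PySem.Set.add (PySem.Set.ofList l) x := by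
  simp [PySem.Set.ofList_eq_foldl, List.foldl_append]

theorem pvMaxOf_append (x y : Int × String) (t : List (Int × String)) :
    pvMaxOf x (t ++ [y]) = max (pvMaxOf x t) y.1 := by
  simp [pvMaxOf, List.foldl_append]

theorem pvMaxOf_isMax (x : Int × String) (t : List (Int × String)) :
    ∀ e ∈ x :: t, e.1 ≤ pvMaxOf x t := by
  rintro e he
  rcases List.mem_cons.mp he with h | h
  · subst h; exact (PySem.List.le_foldl_max _ _).1
  · exact (PySem.List.le_foldl_max ((t.map (fun e => e.1))) x.1).2 e.1
      (List.mem_map.mpr ⟨e, h, rfl⟩)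

-- loop invariant: running pvAltLoop from the state describing a processed prefix x :: t
-- lands in the state describing the full list
theorem pvAltLoop_inv (xs : List (Int × String)) :
    ∀ (x : Int × String) (t : List (Int × String)),
    pvAltLoop xs (pvAllOf (x :: t)) (some (pvMaxOf x t)) (pvTopOf x t) =
      (pvAllOf (x :: (t ++ xs)), some (pvMaxOf x (t ++ xs)), pvTopOf x (t ++ xs)) := by
  induction xs with
  | nil => intro x t; simp [pvAltLoop]
  | cons y ys ih =>
    intro x t
    obtain ⟨s, l⟩ := y
    have hshape : x :: (t ++ [(s, l)]) = (x :: t) ++ [(s, l)] := by simp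
    have hstep : pvAltLoop ((s, l) :: ys) (pvAllOf (x :: t)) (some (pvMaxOf x t)) (pvTopOf x t) =
        pvAltLoop ys (pvAllOf (x :: (t ++ [(s, l)]))) (some (pvMaxOf x (t ++ [(s, l)])))
          (pvTopOf x (t ++ [(s, l)])) := by
      have hall : PySem.Set.add (pvAllOf (x :: t)) l = pvAllOf (x :: (t ++ [(s, l)])) := by
        rw [pvAllOf, pvAllOf, hshape, List.map_append]
        exact (pvOfList_append_one ((x :: t).map (fun e => e.2)) l).symm
      by_cases hgt : s > pvMaxOf x t
      · -- new maximum: pool resets to {l}; no earlier entry reaches score s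
        have hmax : pvMaxOf x (t ++ [(s, l)]) = s := by
          rw [pvMaxOf_append]; exact max_eq_right (le_of_lt hgt)
        have hfilt : (x :: t).filter (fun e => e.1 == s) = [] := by
          apply List.filter_eq_nil_iff.mpr
          intro e he
          have := pvMaxOf_isMax x t e he
          simp only [beq_iff_eq]
          omega
        have htop : pvTopOf x (t ++ [(s, l)]) = PySem.Set.ofList [l] := by
          rw [pvTopOf, hmax, hshape, List.filter_append, hfilt]
          simp [List.filter]
        simp only [pvAltLoop]
        rw [hall, hmax, htop]
        simp [hgt]
      · by_cases heq : s = pvMaxOf x t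
        · -- ties the maximum: pool gains l
          have hmax : pvMaxOf x (t ++ [(s, l)]) = pvMaxOf x t := by
            rw [pvMaxOf_append, heq, max_self]
          have htop : pvTopOf x (t ++ [(s, l)]) = PySem.Set.add (pvTopOf x t) l := by
            rw [pvTopOf, hmax, hshape, List.filter_append]
            have hf : [(s, l)].filter (fun e => e.1 == pvMaxOf x t) = [(s, l)] := by
              simp [List.filter, heq]
            rw [hf, List.map_append]
            simpa [pvTopOf] using
              pvOfList_append_one (((x :: t).filter (fun e => e.1 == pvMaxOf x t)).map (fun e => e.2)) l
          simp only [pvAltLoop]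
          rw [hall, hmax, htop]
          simp [heq]
        · -- below the maximum: pool unchanged
          have hlt : s < pvMaxOf x t := lt_of_le_of_ne (not_lt.mp hgt) heq
          have hmax : pvMaxOf x (t ++ [(s, l)]) = pvMaxOf x t := by
            rw [pvMaxOf_append]; exact max_eq_left (le_of_lt hlt)
          have htop : pvTopOf x (t ++ [(s, l)]) = pvTopOf x t := by
            rw [pvTopOf, hmax, hshape, List.filter_append]
            have hf : [(s, l)].filter (fun e => e.1 == pvMaxOf x t) = [] := by
              have hne : ((s, l).1 == pvMaxOf x t) = false := by simp; omega
              simp [List.filter, hne]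
            rw [hf, List.append_nil]
            rfl
          simp only [pvAltLoop]
          rw [hall, hmax, htop]
          simp [hgt, heq]
    rw [hstep, ih]
    simp

theorem pvAltLoop_run (x : Int × String) (rest : List (Int × String)) :
    pvAltLoop (x :: rest) PySem.Set.empty none PySem.Set.empty =
      (pvAllOf (x :: rest), some (pvMaxOf x rest), pvTopOf x rest) := by
  obtain ⟨s, l⟩ := x
  have h0 : pvAltLoop ((s, l) :: rest) PySem.Set.empty none PySem.Set.empty =
      pvAltLoop rest (pvAllOf [(s, l)]) (some (pvMaxOf (s, l) [])) (pvTopOf (s, l) []) := by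
    simp [pvAltLoop, pvAllOf, pvMaxOf, pvTopOf, PySem.Set.ofList, PySem.Set.empty,
      PySem.Set.add, List.filter]
  rw [h0]
  simpa using pvAltLoop_inv rest (s, l) []

-- ===== VERDICT (by name: the statement is the Claim_ definition above) =====
theorem calculateLabelCriticality_py_spec : Claim_equal_calculateLabelCriticality_py := by
  intro label_list _
  unfold Spec_calculateLabelCriticality_py
  cases label_list with
  | nil => rfl
  | cons x rest =>
    unfold calculateLabelCriticality_py calculateLabelCriticality_py_alt
    rw [pvAltLoop_run]
    have hmax : (PySem.List.max? ((x :: rest).map (fun e => e.1)) (fun y => y)).getD 0 =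
        pvMaxOf x rest := by
      simp [PySem.List.max?_id_cons, pvMaxOf]
    simp only [List.length_cons, if_false, reduceCtorEq]
    rw [hmax]
    simp [pvAllOf, pvTopOf]
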